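-- pv_equiv track=rewrite | github.com/Honorwalk/FLumi | Directory/functions.py | getFCS
-- ===== SOURCE A (Python) =====
-- def getFCS(command):
-- 	binReturn=["0","0","0","0","0","0","0","0"]
-- 	returner=0
-- 	for char in command:
-- 		binChar="{0:08b}".format(ord(char))
-- 		for j in range(0,8):
-- 					if binReturn[j] == binChar[j]:
-- 							binReturn[j]="0"
-- 					else:
-- 							binReturn[j]="1"
--
-- 	returner=hex(int("".join(binReturn),2))[2:4]
-- 	return returner.upper()+"*"
-- ===== SOURCE B (Python) =====
-- def getFCS(command):
--     acc = 0
--     for ch in command: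
--         acc ^= ord(ch)
--     return format(acc, 'X') + '*'
-- ===== Notes on version B (the rewrite author's own statement) =====
-- stated objective: simpler
-- what changed: B keeps a single integer XOR accumulator over the character codes and formats it directly as uppercase hex, instead of A's list of eight bit-strings updated by an 8-iteration per-bit compare-and-flip inner loop followed by binary-string join, reparse and hex-slice.
import Mathlib
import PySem

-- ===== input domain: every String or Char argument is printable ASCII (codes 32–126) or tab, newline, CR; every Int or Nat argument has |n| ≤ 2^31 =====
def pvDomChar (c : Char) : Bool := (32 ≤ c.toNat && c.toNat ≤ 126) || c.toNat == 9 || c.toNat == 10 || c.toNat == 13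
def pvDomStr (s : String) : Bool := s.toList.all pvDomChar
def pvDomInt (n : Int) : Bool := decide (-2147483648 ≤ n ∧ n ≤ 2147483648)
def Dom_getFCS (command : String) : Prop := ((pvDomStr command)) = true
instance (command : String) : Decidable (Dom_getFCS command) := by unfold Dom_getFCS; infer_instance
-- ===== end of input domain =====

-- B replaces A's per-bit list-of-bit-strings compare-and-flip loop by one integer XOR accumulator
-- formatted directly as uppercase hex (simpler).

-- ===== PORT A =====
-- A-side helper: '{0:08b}'.format(n) as a list of bit chars (exact for n < 256, which Dom guarantees)
def pyBin8 (n : Nat) : List Char := (List.range 8).map (fun j => if n.testBit (7 - j) then '1' else '0')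

-- A-side helper: int(s, 2) for a string of '0'/'1' chars
def binToNat (l : List Char) : Nat := l.foldl (fun a c => 2 * a + (if c = '1' then 1 else 0)) 0

-- A-side helper: hex(n)[2:4].upper() (exact for n < 256: at most two hex digits)
def hexDigitU (d : Nat) : Char := if d < 10 then Char.ofNat (48 + d) else Char.ofNat (55 + d)
def hexUpTo2 (n : Nat) : String :=
  if n < 16 then String.ofList [hexDigitU n] else String.ofList [hexDigitU (n / 16), hexDigitU (n % 16)]

-- inner 'for j in range(0,8)' loop of A (binReturn[j] access totalized by getD; both lists have length 8)
def innerLoopA (br binChar : List Char) : List Char :=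
  (List.range 8).foldl
    (fun br j => if br.getD j ' ' = binChar.getD j ' ' then br.set j '0' else br.set j '1') br

def getFCS (command : String) : String :=
  let binReturn :=
    command.toList.foldl (fun br char => innerLoopA br (pyBin8 char.toNat))
      ['0','0','0','0','0','0','0','0']
  (hexUpTo2 (binToNat binReturn)) ++ "*"

-- ===== PORT B =====
-- B-side helper: format(n, 'X') — uppercase hex with no leading zeros, "0" for 0
def hexChar (d : Nat) : Char :=
  ['0','1','2','3','4','5','6','7','8','9','A','B','C','D','E','F'].getD d '0'
def hexRevAux : Nat → Nat → List Char
  | _, 0 => []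
  | 0, _ + 1 => []  -- fuel exhausted; unreachable since fuel starts at n
  | fuel + 1, n + 1 => hexChar ((n + 1) % 16) :: hexRevAux fuel ((n + 1) / 16)
def hexRev (n : Nat) : List Char := hexRevAux n n
def natToHexU (n : Nat) : String :=
  if n = 0 then "0" else String.ofList (hexRev n).reverse

def getFCS_alt (command : String) : String :=
  natToHexU (command.toList.foldl (fun acc ch => acc ^^^ ch.toNat) 0) ++ "*"

-- ===== PRECONDITION & SPEC =====
def Spec_getFCS (command : String) (out : String) : Prop := out = getFCS_alt command
instance (command : String) (out : String) : Decidable (Spec_getFCS command out) := by unfold Spec_getFCS; infer_instance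

-- ===== CLAIM =====
def Claim_equal_getFCS : Prop := ∀ (command : String), Dom_getFCS command → Spec_getFCS command (getFCS command)

-- ===== LEMMAS AND PROOFS =====

set_option maxRecDepth 10000 in
theorem binToNat_pyBin8 : ∀ n, n < 256 → binToNat (pyBin8 n) = n := by decide

set_option maxRecDepth 10000 in
theorem hexList_eq : ∀ n, n < 256 → n ≠ 0 →
    (hexRev n).reverse = (if n < 16 then [hexDigitU n] else [hexDigitU (n / 16), hexDigitU (n % 16)]) := by decide

theorem hexUpTo2_eq_natToHexU (n : Nat) (h : n < 256) : hexUpTo2 n = natToHexU n := by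
  rw [hexUpTo2, natToHexU]
  by_cases hz : n = 0
  · subst hz; rfl
  · rw [if_neg hz, hexList_eq n h hz]; split_ifs <;> rfl

theorem set_step (u v : List Char) (n : Nat) (hn : n < u.length) (w : Char)
    (hw : w = if u[n] = v.getD n ' ' then '0' else '1') :
    (u.mapIdx (fun j x => if j < n then (if x = v.getD j ' ' then '0' else '1') else x)).set n w
      = u.mapIdx (fun j x => if j < n + 1 then (if x = v.getD j ' ' then '0' else '1') else x) := by
  apply List.ext_getElem (by simp)
  intro i hi₁ hi₂
  have hiu : i < u.length := by simpa using hi₂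
  simp only [List.getElem_set, List.getElem_mapIdx]
  rcases Nat.lt_trichotomy i n with hlt | heq | hgt
  · rw [if_neg (by omega : ¬ n = i), if_pos hlt, if_pos (by omega : i < n + 1)]
  · subst heq; subst hw; rw [if_pos rfl, if_pos (Nat.lt_succ_self _)]
  · rw [if_neg (by omega : ¬ n = i), if_neg (by omega : ¬ i < n), if_neg (by omega : ¬ i < n + 1)]

theorem loop_mapIdx (v : List Char) :
    ∀ (n : Nat) (u : List Char), n ≤ u.length →
    (List.range n).foldl
      (fun br j => if br.getD j ' ' = v.getD j ' ' then br.set j '0' else br.set j '1') u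
      = u.mapIdx (fun j x => if j < n then (if x = v.getD j ' ' then '0' else '1') else x) := by
  intro n
  induction n with
  | zero =>
      intro u _
      apply List.ext_getElem (by simp)
      intro i hi₁ hi₂
      simp [List.getElem_mapIdx]
  | succ n ih =>
      intro u hn
      rw [List.range_succ, List.foldl_append, List.foldl_cons, List.foldl_nil,
        ih u (Nat.le_of_succ_le hn)]
      have hnu : n < u.length := by omega
      have hgd : (u.mapIdx (fun j x => if j < n then (if x = v.getD j ' ' then '0' else '1') else x)).getD n ' ' = u[n] := by
        rw [List.getD_eq_getElem?_getD, List.getElem?_eq_getElem (by simpa using hnu)]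
        simp [List.getElem_mapIdx]
      rw [hgd]
      by_cases h : u[n] = v.getD n ' '
      · rw [if_pos h]; exact set_step u v n hnu '0' (by rw [if_pos h])
      · rw [if_neg h]; exact set_step u v n hnu '1' (by rw [if_neg h])

theorem innerLoopA_xor (a c : Nat) :
    innerLoopA (pyBin8 a) (pyBin8 c) = pyBin8 (a ^^^ c) := by
  rw [innerLoopA, loop_mapIdx _ 8 _ (by simp [pyBin8])]
  apply List.ext_getElem (by simp [pyBin8])
  intro i hi₁ hi₂
  have hi : i < 8 := by simpa [pyBin8] using hi₂
  simp only [List.getElem_mapIdx, pyBin8, List.getElem_map, List.getElem_range,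
    List.getD_eq_getElem?_getD]
  rw [List.getElem?_eq_getElem (by simpa using hi)]
  simp only [List.getElem_map, List.getElem_range, hi, if_true, Option.getD_some,
    Nat.testBit_xor]
  rcases h1 : a.testBit (7 - i) <;> rcases h2 : c.testBit (7 - i) <;> simp

theorem fold_inv (l : List Char) (a : Nat) :
    l.foldl (fun br char => innerLoopA br (pyBin8 char.toNat)) (pyBin8 a)
      = pyBin8 (l.foldl (fun acc ch => acc ^^^ ch.toNat) a) := by
  induction l generalizing a with
  | nil => rfl
  | cons c l ih => simp only [List.foldl_cons, innerLoopA_xor, ih]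

theorem fold_lt (l : List Char) (h : ∀ c ∈ l, c.toNat < 256) (a : Nat) (ha : a < 256) :
    l.foldl (fun acc ch => acc ^^^ ch.toNat) a < 256 := by
  induction l generalizing a with
  | nil => exact ha
  | cons c l ih =>
      exact ih (fun x hx => h x (List.mem_cons_of_mem _ hx))
        _ (Nat.xor_lt_two_pow (n := 8) ha (h c (List.mem_cons_self ..)))

-- ===== VERDICT =====
theorem getFCS_spec : Claim_equal_getFCS := by
  intro command hdom
  have hcodes : ∀ c ∈ command.toList, c.toNat < 256 := by
    intro c hc
    have := List.all_eq_true.mp hdom c hc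
    simp only [pvDomChar, Bool.or_eq_true, Bool.and_eq_true, decide_eq_true_eq,
      beq_iff_eq] at this
    omega
  show getFCS command = getFCS_alt command
  have h0 : (['0','0','0','0','0','0','0','0'] : List Char) = pyBin8 0 := by decide
  have hlt := fold_lt _ hcodes 0 (by norm_num)
  simp only [getFCS, getFCS_alt, h0, fold_inv, binToNat_pyBin8 _ hlt,
    hexUpTo2_eq_natToHexU _ hlt]
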